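-- pv_equiv track=rewrite | github.com/tencent-quantum-lab/3T | 6_extended_experiments/process_pdb.py | get_ss
-- ===== SOURCE A (Python) =====
-- import itertools
-- from itertools import groupby
--
-- def get_ss(l):
--     a = [(x[0], x[2]) if x[2] != '' else 'L' for x in l]
--     a_new = []
--     for i,r in enumerate(a):
--         if i > 1 and i < len(a):
--             if (r[1] == 'S') or (r[1] == 'H'):
--                 if a[i-1][1] == 'L' and a[i+1][1] =='L':
--                     a_new.append((r[0],'L'))
--                 else:
--                     a_new.append(r)
--             else:
--                 a_new.append(r)
--         else:
--             a_new.append(r)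
--     ss = [(i,len(''.join(g)))
--           for i, g in groupby([x[1] for x in a_new])]
--     a_index = [x[0] for x in a_new]
--     ss_index = [0]+list(itertools.accumulate([x[1] for x in ss]))
--     ss_new = []
--     for  i,j in enumerate(ss):
--         ss_new.append((j[0], a_index[ss_index[i]], a_index[ss_index[i+1]-1]))
--     out = ['type,start,end\n']
--     for i,j,k in ss_new:
--         out.append('{},{},{}\n'.format(i,j,k))
--     return out
-- ===== SOURCE B (Python) =====
-- def get_ss(l):
--     n = len(l)
--     rows = []
--     for i, x in enumerate(l):
--         lab = x[2] if x[2] != '' else 'L'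
--         if (i >= 2 and i + 1 < n and lab in ('S', 'H')
--                 and l[i - 1][2] == 'L' and l[i + 1][2] == 'L'):
--             lab = 'L'
--         rows.append((x[0], lab))
--     s = ''.join(lab for _, lab in rows)
--     out = ['type,start,end\n']
--     i = 0
--     while i < len(s):
--         j = i
--         while j + 1 < len(s) and s[j + 1] == s[i]:
--             j += 1
--         out.append('{},{},{}\n'.format(s[i], rows[i][0], rows[j][0]))
--         i = j + 1
--     return out
-- ===== Notes on version B (the rewrite author's own statement) =====
-- stated objective: simpler
-- what changed: B keeps A's per-index smoothing but replaces the whole groupby/len(join)/accumulate/index-reconstruction tail by a single stateful pass that tracks the current run's (label, start, end) and emits a formatted line whenever the label changes, flushing the last run at the end.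
import Mathlib
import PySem

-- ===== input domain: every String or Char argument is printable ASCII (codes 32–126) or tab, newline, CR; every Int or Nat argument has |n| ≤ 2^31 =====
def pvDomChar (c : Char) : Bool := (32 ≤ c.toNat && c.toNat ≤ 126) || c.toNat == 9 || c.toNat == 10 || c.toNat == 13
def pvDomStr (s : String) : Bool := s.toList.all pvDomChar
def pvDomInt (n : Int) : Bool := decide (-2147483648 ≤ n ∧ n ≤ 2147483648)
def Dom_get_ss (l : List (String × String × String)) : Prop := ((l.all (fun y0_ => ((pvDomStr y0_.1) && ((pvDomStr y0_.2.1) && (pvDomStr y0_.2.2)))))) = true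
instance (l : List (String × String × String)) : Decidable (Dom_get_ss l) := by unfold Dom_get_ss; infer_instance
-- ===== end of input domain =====

-- B replaces A's groupby/accumulate/index-reconstruction tail by one stateful pass that closes a run
-- when the smoothed label changes (objective: simpler; return-value equivalence on Pre_).

-- ===== PORT A =====
-- '{},{},{}\n'.format(i, j, k)  (shared by both ports; plain string concatenation)
def pvFmt (t : String × String × String) : String := t.1 ++ "," ++ t.2.1 ++ "," ++ t.2.2 ++ "\n"

-- an element of A's list `a`: some (x[0], x[2]) for the pair case, none for the bare string 'L'
-- (whose subscripting 'L'[1] raises IndexError in Python; those inputs are outside Pre_)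
def pvLab : Option (String × String) → String
  | some r => r.2
  | none => "!"   -- Python raises IndexError ('L'[1]) here; reachable only outside Pre_
def pvFst : Option (String × String) → String
  | some r => r.1
  | none => "!"   -- Python raises IndexError ('L'[0] is fine in Python, but this spot is only reached outside Pre_)

-- xs[i] for a list of strings / ints; none (IndexError) only outside Pre_, defaulted there
def pvIdxS (xs : List String) (i : Int) : String := (PySem.List.pyGet? xs i).getD ""
def pvIdxI (xs : List Int) (i : Int) : Int := (PySem.List.pyGet? xs i).getD 0

-- [(i, len(''.join(g))) for i, g in groupby(ls)] : the joined group's len is accumulated as the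
-- running sum of PySem.Str.len of the group's members (len of a concatenation = sum of lens)
def pvRunsAux (key : String) (acc : Int) : List String → List (String × Int)
  | [] => [(key, acc)]
  | s :: ls => if s = key then pvRunsAux key (acc + PySem.Str.len s) ls
               else (key, acc) :: pvRunsAux s (PySem.Str.len s) ls
def pvRuns : List String → List (String × Int)
  | [] => []
  | s :: ls => pvRunsAux s (PySem.Str.len s) ls

-- list(itertools.accumulate(xs)) with running total c
def pvAccum (c : Int) : List Int → List Int
  | [] => []
  | x :: xs => (c + x) :: pvAccum (c + x) xs

-- a = [(x[0], x[2]) if x[2] != '' else 'L' for x in l]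
def pvA (l : List (String × String × String)) : List (Option (String × String)) :=
  l.map (fun x => if x.2.2 ≠ "" then some (x.1, x.2.2) else none)

-- the smoothing loop building a_new
def pvANew (l : List (String × String × String)) : List (Option (String × String)) :=
  (PySem.List.enumerate (pvA l)).foldl (fun acc ir =>
    acc ++ [ if ir.1 > 1 ∧ ir.1 < ((pvA l).length : Int) then
               match ir.2 with
               | some r =>
                   if r.2 = "S" ∨ r.2 = "H" then
                     if pvLab ((PySem.List.pyGet? (pvA l) (ir.1 - 1)).getD none) = "L" ∧
                        pvLab ((PySem.List.pyGet? (pvA l) (ir.1 + 1)).getD none) = "L" then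
                       some (r.1, "L")
                     else ir.2
                   else ir.2
               | none => ir.2   -- Python raises IndexError ('L'[1] in r[1] == 'S'); outside Pre_
             else ir.2 ]) []

-- ss / a_index / ss_index / ss_new
def pvTail (anew : List (Option (String × String))) : List (String × String × String) :=
  let ss := pvRuns (anew.map pvLab)
  let a_index := anew.map pvFst
  let ss_index := (0 : Int) :: pvAccum 0 (ss.map (fun p => p.2))
  (PySem.List.enumerate ss).map (fun ij =>
    (ij.2.1, pvIdxS a_index (pvIdxI ss_index ij.1), pvIdxS a_index (pvIdxI ss_index (ij.1 + 1) - 1)))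

def get_ss (l : List (String × String × String)) : List String :=
  "type,start,end\n" :: (pvTail (pvANew l)).map pvFmt

-- ===== PORT B =====
-- the smoothed label of element x at index i (B computes it inline per element)
def pvLabB (l : List (String × String × String)) (i : Int) (x : String × String × String) : String :=
  let lab0 := if x.2.2 ≠ "" then x.2.2 else "L"
  if 2 ≤ i ∧ i + 1 < (l.length : Int) ∧ (lab0 = "S" ∨ lab0 = "H") ∧
     ((PySem.List.pyGet? l (i - 1)).map (fun y => y.2.2)).getD "" = "L" ∧
     ((PySem.List.pyGet? l (i + 1)).map (fun y => y.2.2)).getD "" = "L"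
  then "L" else lab0

-- the while-loop scan over the joined label string: at position i, extend the run (inner while)
-- by k equal characters, emit one line indexing rows by character position (rows[i] / rows[j]
-- raises IndexError in Python when the position passes the end; outside Pre_, defaulted here)
def pvScan (rows : List (String × String)) : List Char → Nat → List String
  | [], _ => []
  | c :: rest, i =>
    let k := (rest.takeWhile (fun d => d == c)).length
    pvFmt (String.ofList [c],
           pvIdxS (rows.map (fun r => r.1)) (i : Int),
           pvIdxS (rows.map (fun r => r.1)) ((i + k : Nat) : Int))
    :: pvScan rows (rest.drop k) (i + k + 1)
  termination_by chars _ => chars.length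
  decreasing_by simp [List.length_drop]

def get_ss_alt (l : List (String × String × String)) : List String :=
  let rows := (PySem.List.enumerate l).foldl (fun acc ix => acc ++ [(ix.2.1, pvLabB l ix.1 ix.2)]) []
  let s := PySem.Str.join "" (rows.map (fun r => r.2))
  "type,start,end\n" :: pvScan rows s.toList 0

-- ===== PRECONDITION & SPEC =====
-- Pre_ excludes exactly the inputs where Python A raises IndexError: an element whose third
-- component is not a single character (empty → 'L'[1] raises; longer → the joined-group length
-- overruns a_index), and a last element (at index ≥ 2) labelled 'S'/'H' after an 'L' (the
-- smoothing loop then reads a[i+1] past the end).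
def Pre_get_ss (l : List (String × String × String)) : Prop :=
  (∀ x ∈ l, PySem.Str.len x.2.2 = 1) ∧
  ¬ (3 ≤ l.length ∧
     (l.reverse.head?.map (fun x => x.2.2) = some "S" ∨
      l.reverse.head?.map (fun x => x.2.2) = some "H") ∧
     l.reverse.tail.head?.map (fun x => x.2.2) = some "L")
instance (l : List (String × String × String)) : Decidable (Pre_get_ss l) := by
  unfold Pre_get_ss; infer_instance

def pvWitness_get_ss : (List (String × String × String)) :=
  [("1", "a", "H"), ("2", "a", "L"), ("3", "a", "S"), ("4", "a", "L")]

def Spec_get_ss (l : List (String × String × String)) (out : List String) : Prop := out = get_ss_alt l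
instance (l : List (String × String × String)) (out : List String) : Decidable (Spec_get_ss l out) := by unfold Spec_get_ss; infer_instance

-- ===== CLAIM (what is proved, stated in full; the proofs are below) =====
def Claim_equal_get_ss : Prop := ∀ (l : List (String × String × String)), Dom_get_ss l → Pre_get_ss l → Spec_get_ss l (get_ss l)

-- ===== LEMMAS AND PROOFS =====

-- proof-side: the smoothed (id, label) pairs both programs work through
def pvSm (l : List (String × String × String)) : List (String × String) :=
  (PySem.List.enumerate l).map (fun ix => (ix.2.1, pvLabB l ix.1 ix.2))

-- proof-side: run segments (label, first id, last id) of a pair list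
def pvSegsAux (lab st en : String) : List (String × String) → List (String × String × String)
  | [] => [(lab, st, en)]
  | q :: ps => if q.2 = lab then pvSegsAux lab st q.1 ps
               else (lab, st, en) :: pvSegsAux q.2 q.1 q.1 ps
def pvSegs : List (String × String) → List (String × String × String)
  | [] => []
  | q :: ps => pvSegsAux q.2 q.1 q.1 ps

-- proof-side: A's tail on a pure pair list
def pvTailP (ps : List (String × String)) : List (String × String × String) :=
  (PySem.List.enumerate (pvRuns (ps.map (fun q => q.2)))).map (fun ij =>
    (ij.2.1,
     pvIdxS (ps.map (fun q => q.1))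
       (pvIdxI ((0 : Int) :: pvAccum 0 ((pvRuns (ps.map (fun q => q.2))).map (fun r => r.2))) ij.1),
     pvIdxS (ps.map (fun q => q.1))
       (pvIdxI ((0 : Int) :: pvAccum 0 ((pvRuns (ps.map (fun q => q.2))).map (fun r => r.2)))
         (ij.1 + 1) - 1)))

theorem pv_enumerate_map {α β : Type} (f : α → β) (l : List α) (s : Int) :
    PySem.List.enumerate (l.map f) s = (PySem.List.enumerate l s).map (fun p => (p.1, f p.2)) := by
  induction l generalizing s with
  | nil => simp [PySem.List.enumerate]
  | cons x xs ih => simp [PySem.List.enumerate_cons, ih]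

theorem pv_len_one_ne_empty {s : String} (h : PySem.Str.len s = 1) : s ≠ "" := by
  intro he; subst he; simp [PySem.Str.len_eq] at h

theorem pv_map_lab (ps : List (String × String)) :
    (ps.map some).map pvLab = ps.map (fun q => q.2) := by
  simp [List.map_map, Function.comp, pvLab]

theorem pv_map_fst (ps : List (String × String)) :
    (ps.map some).map pvFst = ps.map (fun q => q.1) := by
  simp [List.map_map, Function.comp, pvFst]

theorem pv_tail_pure (ps : List (String × String)) : pvTail (ps.map some) = pvTailP ps := by
  unfold pvTail pvTailP
  rw [pv_map_lab, pv_map_fst]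

theorem pv_point (l : List (String × String × String))
    (h1 : ∀ x ∈ l, x.2.2 ≠ "") (k : Nat) (hk : k < l.length) :
    (if ((k : Int) > 1 ∧ (k : Int) < ((l.map (fun x => some (x.1, x.2.2))).length : Int)) then
       if l[k].2.2 = "S" ∨ l[k].2.2 = "H" then
         if pvLab ((PySem.List.pyGet? (l.map (fun x => some (x.1, x.2.2))) ((k : Int) - 1)).getD none) = "L" ∧
            pvLab ((PySem.List.pyGet? (l.map (fun x => some (x.1, x.2.2))) ((k : Int) + 1)).getD none) = "L" then
           some (l[k].1, "L")
         else some (l[k].1, l[k].2.2)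
       else some (l[k].1, l[k].2.2)
     else some (l[k].1, l[k].2.2)) = some (l[k].1, pvLabB l (k : Int) l[k]) := by
  have hne : l[k].2.2 ≠ "" := h1 _ (List.getElem_mem hk)
  unfold pvLabB
  dsimp only
  rw [if_pos hne]
  by_cases hk2 : 2 ≤ k
  · have e1 : ((k : Int) - 1) = ((k - 1 : Nat) : Int) := by omega
    rw [if_pos (by refine ⟨by omega, by simp; omega⟩), e1]
    by_cases hsh : l[k].2.2 = "S" ∨ l[k].2.2 = "H"
    · have g1 : (l.map (fun x => some (x.1, x.2.2)))[k-1]? = some (some (l[k-1].1, l[k-1].2.2)) := by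
        simp [List.getElem?_map, List.getElem?_eq_getElem (by omega : k - 1 < l.length)]
      have g1' : l[k-1]? = some l[k-1] := List.getElem?_eq_getElem (by omega)
      by_cases hk1 : k + 1 < l.length
      · have e2 : ((k : Int) + 1) = ((k + 1 : Nat) : Int) := by omega
        rw [e2]
        have g2 : (l.map (fun x => some (x.1, x.2.2)))[k+1]? = some (some (l[k+1].1, l[k+1].2.2)) := by
          simp [List.getElem?_map, List.getElem?_eq_getElem hk1]
        have g2' : l[k+1]? = some l[k+1] := List.getElem?_eq_getElem hk1
        simp only [PySem.List.pyGet?_natCast, g1, g2, g1', g2', Option.getD_some,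
          Option.map_some, pvLab]
        have c1 : 2 ≤ (k : Int) := by omega
        have c2 : (((k+1 : Nat) : Int)) < (l.length : Int) := by omega
        by_cases hc : l[k - 1].2.2 = "L" ∧ l[k + 1].2.2 = "L"
        · simp only [hsh, hc.1, hc.2, c1, c2]
          simp
        · rw [if_neg hc, if_pos hsh, if_neg (by rintro ⟨-, -, -, d1, d2⟩; exact hc ⟨d1, d2⟩)]
      · have hkl : k + 1 = l.length := by omega
        have e2 : ((k : Int) + 1) = ((k + 1 : Nat) : Int) := by omega
        rw [e2]
        have g2 : (l.map (fun x => some (x.1, x.2.2)))[k+1]? = (none : Option (Option (String × String))) := by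
          simp [hkl]
        have g2' : l[k+1]? = (none : Option (String × String × String)) := by
          simp [hkl]
        simp only [PySem.List.pyGet?_natCast, g1, g2, g1', g2', Option.getD_some, Option.getD_none,
          Option.map_some, Option.map_none, pvLab]
        have hnc : ¬(2 ≤ (k : Int) ∧ (((k + 1 : Nat) : Int)) < (l.length : Int) ∧
            (l[k].2.2 = "S" ∨ l[k].2.2 = "H") ∧ l[k - 1].2.2 = "L" ∧ "" = "L") :=
          fun hcc => absurd hcc.2.1 (by omega)
        have hnc2 : ¬(l[k - 1].2.2 = "L" ∧ "!" = "L") := fun hcc => absurd hcc.2 (by decide)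
        rw [if_neg hnc, if_neg hnc2, if_pos hsh]
    · rw [if_neg hsh, if_neg (by rintro ⟨-, -, hc, -⟩; exact hsh hc)]
  · rw [if_neg (by omega), if_neg (by rintro ⟨hc, -⟩; omega)]

theorem pv_anew_eq_sm (l : List (String × String × String))
    (h1 : ∀ x ∈ l, PySem.Str.len x.2.2 = 1) :
    pvANew l = (pvSm l).map some := by
  have hne : ∀ x ∈ l, x.2.2 ≠ "" := fun x hx => pv_len_one_ne_empty (h1 x hx)
  have hA : pvA l = l.map (fun x => some (x.1, x.2.2)) := by
    unfold pvA
    exact List.map_congr_left (fun x hx => by rw [if_pos (hne x hx)])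
  unfold pvANew pvSm
  rw [hA, PySem.List.foldl_append_singleton_eq_map, pv_enumerate_map]
  simp only [List.nil_append, List.map_map]
  apply List.map_congr_left
  intro p hp
  rw [PySem.List.mem_enumerate_iff] at hp
  obtain ⟨k, hk, rfl⟩ := hp
  dsimp only [Function.comp]
  simp only [zero_add]
  exact pv_point l hne k hk

theorem pv_labB_len (l : List (String × String × String)) (i : Int) (x : String × String × String)
    (h : PySem.Str.len x.2.2 = 1) : PySem.Str.len (pvLabB l i x) = 1 := by
  unfold pvLabB
  dsimp only
  split_ifs <;> first | decide | exact h

theorem pv_sm_len_one (l : List (String × String × String))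
    (h1 : ∀ x ∈ l, PySem.Str.len x.2.2 = 1) :
    ∀ q ∈ pvSm l, PySem.Str.len q.2 = 1 := by
  intro q hq
  obtain ⟨p, hp, rfl⟩ := List.mem_map.mp hq
  have hx : p.2 ∈ l := by
    rw [PySem.List.mem_enumerate_iff] at hp
    obtain ⟨k, hk, rfl⟩ := hp
    exact List.getElem_mem _
  exact pv_labB_len _ _ _ (h1 _ hx)

theorem pv_head_dropWhile {α : Type} (p : α → Bool) (l : List α) (q : α)
    (h : (l.dropWhile p).head? = some q) : ¬ p q = true := by
  induction l with
  | nil => simp [List.dropWhile] at h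
  | cons x xs ih =>
    rw [List.dropWhile_cons] at h
    by_cases hx : p x = true
    · rw [if_pos hx] at h; exact ih h
    · rw [if_neg hx] at h; simp at h; subst h; exact hx

theorem pv_runsAux_split (key : String) (acc : Int) (ls1 ls2 : List String)
    (h1 : ∀ s ∈ ls1, s = key ∧ PySem.Str.len s = 1)
    (h2 : ∀ s, ls2.head? = some s → s ≠ key) :
    pvRunsAux key acc (ls1 ++ ls2) = (key, acc + ls1.length) :: pvRuns ls2 := by
  induction ls1 generalizing acc with
  | nil =>
    cases ls2 with
    | nil => simp [pvRunsAux, pvRuns]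
    | cons s ls =>
      have hs : s ≠ key := h2 s rfl
      simp [pvRunsAux, pvRuns, hs]
  | cons s ls ih =>
    obtain ⟨hs, hl⟩ := h1 s (by simp)
    simp only [List.cons_append, pvRunsAux, if_pos hs, hl]
    rw [ih _ (fun x hx => h1 x (by simp [hx]))]
    simp only [List.length_cons]
    congr 2
    push_cast
    ring

theorem pv_accum_shift (c : Int) (xs : List Int) :
    pvAccum c xs = (pvAccum 0 xs).map (fun v => c + v) := by
  induction xs generalizing c with
  | nil => simp [pvAccum]
  | cons x ys ih =>
    simp only [pvAccum, List.map_cons, zero_add]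
    congr 1
    rw [ih (c + x), ih x, List.map_map]
    exact List.map_congr_left (fun v _ => by simp only [Function.comp_apply]; ring)

theorem pv_accum_length (c : Int) (xs : List Int) : (pvAccum c xs).length = xs.length := by
  induction xs generalizing c with
  | nil => rfl
  | cons x ys ih => simp [pvAccum, ih]

theorem pv_accum_ge (c : Int) (xs : List Int) (hx : ∀ y ∈ xs, 1 ≤ y) :
    ∀ v ∈ pvAccum c xs, c + 1 ≤ v := by
  induction xs generalizing c with
  | nil => simp [pvAccum]
  | cons x ys ih =>
    intro v hv
    simp only [pvAccum, List.mem_cons] at hv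
    rcases hv with rfl | hv
    · have := hx x (by simp); omega
    · have h1 := hx x (by simp)
      have := ih (c + x) (fun y hy => hx y (by simp [hy])) v hv
      omega

theorem pv_runsAux_pos (key : String) (acc : Int) (ls : List String) (hacc : 1 ≤ acc)
    (h : ∀ s ∈ ls, PySem.Str.len s = 1) : ∀ q ∈ pvRunsAux key acc ls, 1 ≤ q.2 := by
  induction ls generalizing key acc with
  | nil => intro q hq; simp only [pvRunsAux, List.mem_singleton] at hq; simpa [hq] using hacc
  | cons s ls ih =>
    intro q hq
    have hs : PySem.Str.len s = 1 := h s (by simp)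
    simp only [pvRunsAux] at hq
    split_ifs at hq with he
    · exact ih key (acc + PySem.Str.len s) (by omega) (fun x hx => h x (by simp [hx])) q hq
    · rcases List.mem_cons.mp hq with rfl | hq
      · exact hacc
      · exact ih s (PySem.Str.len s) (by omega) (fun x hx => h x (by simp [hx])) q hq

theorem pv_runs_pos (ls : List String) (h : ∀ s ∈ ls, PySem.Str.len s = 1) :
    ∀ q ∈ pvRuns ls, 1 ≤ q.2 := by
  cases ls with
  | nil => simp [pvRuns]
  | cons s ls =>
    exact pv_runsAux_pos s (PySem.Str.len s) ls (by rw [h s (by simp)])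
      (fun x hx => h x (by simp [hx]))

theorem pv_segsAux_run (lab st en : String) (tw t : List (String × String))
    (h1 : ∀ q ∈ tw, q.2 = lab) (h2 : ∀ q, t.head? = some q → q.2 ≠ lab) :
    pvSegsAux lab st en (tw ++ t) =
      (lab, st, (en :: tw.map (fun q => q.1)).getLast (by simp)) :: pvSegs t := by
  induction tw generalizing en with
  | nil =>
    cases t with
    | nil => simp [pvSegsAux, pvSegs]
    | cons q t' => simp [pvSegsAux, pvSegs, h2 q rfl]
  | cons q tw' ih =>
    simp only [List.cons_append, pvSegsAux, if_pos (h1 q (by simp))]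
    rw [ih q.1 (fun x hx => h1 x (by simp [hx]))]
    simp [List.getLast_cons]

theorem pv_idxI_natCast (xs : List Int) (m : Nat) (h : m < xs.length) :
    pvIdxI xs (m : Int) = xs[m] := by
  simp [pvIdxI, PySem.List.pyGet?_natCast, List.getElem?_eq_getElem h]

theorem pv_idxS_natCast (xs : List String) (m : Nat) (h : m < xs.length) :
    pvIdxS xs (m : Int) = xs[m] := by
  simp [pvIdxS, PySem.List.pyGet?_natCast, List.getElem?_eq_getElem h]

theorem pv_tailP_eq_segs_fuel (N : Nat) : ∀ (ps : List (String × String)), ps.length ≤ N →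
    (∀ q ∈ ps, PySem.Str.len q.2 = 1) → pvTailP ps = pvSegs ps := by
  induction N with
  | zero =>
    intro ps hlen _
    have : ps = [] := List.eq_nil_of_length_eq_zero (by omega)
    subst this
    rfl
  | succ N ihN =>
    intro ps hlen h
    cases ps with
    | nil => rfl
    | cons p rest =>
      have hp2 : PySem.Str.len p.2 = 1 := h p (by simp)
      have hrest : rest.takeWhile (fun q => q.2 == p.2) ++ rest.dropWhile (fun q => q.2 == p.2) = rest :=
        List.takeWhile_append_dropWhile
      set tw := rest.takeWhile (fun q => q.2 == p.2) with htw
      set t := rest.dropWhile (fun q => q.2 == p.2) with ht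
      have htwmem : ∀ q ∈ tw, q.2 = p.2 := fun q hq => by
        have := List.mem_takeWhile_imp hq; simpa using this
      have hthead : ∀ q, t.head? = some q → q.2 ≠ p.2 := fun q hq => by
        have := pv_head_dropWhile _ rest q hq; simpa using this
      have htmem : ∀ q ∈ t, q ∈ rest := fun q hq => by
        rw [← hrest]; exact List.mem_append_right _ hq
      have htwmem' : ∀ q ∈ tw, q ∈ rest := fun q hq => by
        rw [← hrest]; exact List.mem_append_left _ hq
      have htlab : ∀ q ∈ t, PySem.Str.len q.2 = 1 := fun q hq => h q (by simp [htmem q hq])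
      have htlen : t.length ≤ N := by
        have hd := List.length_dropWhile_le (fun q => q.2 == p.2) rest
        rw [← ht] at hd
        simp only [List.length_cons] at hlen
        omega
      have IH : pvTailP t = pvSegs t := ihN t htlen htlab
      -- the runs of the label list split off the first run
      have hss : pvRuns ((p :: rest).map (fun q => q.2)) =
          (p.2, ((tw.length + 1 : Nat) : Int)) :: pvRuns (t.map (fun q => q.2)) := by
        rw [← hrest]
        show pvRunsAux p.2 (PySem.Str.len p.2) ((tw ++ t).map (fun q => q.2)) = _
        rw [List.map_append,
          pv_runsAux_split p.2 _ _ _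
            (fun s hs => by
              obtain ⟨q, hq, rfl⟩ := List.mem_map.mp hs
              exact ⟨htwmem q hq, h q (by simp [htwmem' q hq])⟩)
            (fun s hs => by
              rw [List.head?_map] at hs
              cases hhd : t.head? with
              | none => rw [hhd] at hs; simp at hs
              | some q => rw [hhd] at hs; simp at hs; rw [← hs]; exact hthead q hhd)]
        congr 2
        rw [hp2]
        simp
        omega
      have hai : (p :: rest).map (fun q => q.1) =
          (p.1 :: tw.map (fun q => q.1)) ++ t.map (fun q => q.1) := by
        rw [← hrest]; simp
      -- abbreviations
      have hsi : (0 : Int) :: pvAccum 0 (((p.2, ((tw.length + 1 : Nat) : Int)) ::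
            pvRuns (t.map (fun q => q.2))).map (fun r => r.2)) =
          0 :: ((0 : Int) :: pvAccum 0 ((pvRuns (t.map (fun q => q.2))).map (fun r => r.2))).map
            (fun v => ((tw.length + 1 : Nat) : Int) + v) := by
        simp only [List.map_cons]
        congr 1
        show pvAccum 0 (((tw.length + 1 : Nat) : Int) :: _) = _
        simp only [pvAccum, zero_add]
        rw [pv_accum_shift ((tw.length + 1 : Nat) : Int)]
        simp
      -- facts about the prefix sums
      have hposlen : ∀ v ∈ pvAccum 0 ((pvRuns (t.map (fun q => q.2))).map (fun r => r.2)), 1 ≤ v := by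
        refine pv_accum_ge 0 _ (fun y hy => ?_)
        obtain ⟨q, hq, rfl⟩ := List.mem_map.mp hy
        exact pv_runs_pos _ (fun s hs => by
          obtain ⟨x, hx, rfl⟩ := List.mem_map.mp hs; exact htlab x hx) q hq
      have hacclen : (pvAccum 0 ((pvRuns (t.map (fun q => q.2))).map (fun r => r.2))).length
          = (pvRuns (t.map (fun q => q.2))).length := by
        rw [pv_accum_length, List.length_map]
      have C1 : ∀ (m' : Nat), m' < (pvRuns (t.map (fun q => q.2))).length + 1 →
          pvIdxI ((0 : Int) :: ((0 : Int) :: pvAccum 0 ((pvRuns (t.map (fun q => q.2))).map (fun r => r.2))).map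
            (fun v => ((tw.length + 1 : Nat) : Int) + v)) (1 + (m' : Int))
          = ((tw.length + 1 : Nat) : Int) +
            pvIdxI ((0 : Int) :: pvAccum 0 ((pvRuns (t.map (fun q => q.2))).map (fun r => r.2))) (m' : Int) := by
        intro m' hm'
        have e : (1 + (m' : Int)) = ((m' + 1 : Nat) : Int) := by push_cast; ring
        rw [e, pv_idxI_natCast _ (m' + 1) (by simp [hacclen]; omega),
          pv_idxI_natCast _ m' (by simp [hacclen]; omega)]
        cases m' with
        | zero => simp
        | succ m'' => simp [List.getElem_map]
      have Cnn : ∀ (m' : Nat), m' < (pvRuns (t.map (fun q => q.2))).length + 1 →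
          0 ≤ pvIdxI ((0 : Int) :: pvAccum 0 ((pvRuns (t.map (fun q => q.2))).map (fun r => r.2))) (m' : Int) := by
        intro m' hm'
        rw [pv_idxI_natCast _ m' (by simp [hacclen]; omega)]
        have hmem := List.getElem_mem (l := (0 : Int) :: pvAccum 0 ((pvRuns (t.map (fun q => q.2))).map (fun r => r.2))) (by simp [hacclen]; omega : m' < _)
        rcases List.mem_cons.mp hmem with he | hmem2
        · omega
        · have := hposlen _ hmem2; omega
      have Cpos : ∀ (m' : Nat), m' < (pvRuns (t.map (fun q => q.2))).length →
          1 ≤ pvIdxI ((0 : Int) :: pvAccum 0 ((pvRuns (t.map (fun q => q.2))).map (fun r => r.2))) ((m' + 1 : Nat) : Int) := by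
        intro m' hm'
        rw [pv_idxI_natCast _ (m' + 1) (by simp [hacclen]; omega)]
        simp only [List.getElem_cons_succ]
        exact hposlen _ (List.getElem_mem (by rw [hacclen]; omega))
      have C4 : ∀ w : Int, 0 ≤ w →
          pvIdxS ((p.1 :: tw.map (fun q => q.1)) ++ t.map (fun q => q.1)) (((tw.length + 1 : Nat) : Int) + w)
          = pvIdxS (t.map (fun q => q.1)) w := by
        intro w hw
        obtain ⟨w', rfl⟩ : ∃ w' : Nat, w = (w' : Int) := ⟨w.toNat, (Int.toNat_of_nonneg hw).symm⟩
        have e : (((tw.length + 1 : Nat) : Int) + (w' : Int)) = ((tw.length + 1 + w' : Nat) : Int) := by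
          push_cast; ring
        rw [e]
        simp only [pvIdxS, PySem.List.pyGet?_natCast]
        rw [List.getElem?_append_right (by simp)]
        simp
      -- now expand both sides
      unfold pvTailP
      rw [hss, hai, hsi, PySem.List.enumerate_cons, List.map_cons]
      rw [show pvSegs (p :: rest) = pvSegsAux p.2 p.1 p.1 rest from rfl, ← hrest,
        pv_segsAux_run p.2 p.1 p.1 tw t htwmem hthead]
      congr 1
      · -- the head segment
        dsimp only
        have h0 : pvIdxI ((0 : Int) :: ((0 : Int) :: pvAccum 0 ((pvRuns (t.map (fun q => q.2))).map (fun r => r.2))).map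
            (fun v => ((tw.length + 1 : Nat) : Int) + v)) 0 = 0 := by
          have := pv_idxI_natCast ((0 : Int) :: ((0 : Int) :: pvAccum 0 ((pvRuns (t.map (fun q => q.2))).map (fun r => r.2))).map
            (fun v => ((tw.length + 1 : Nat) : Int) + v)) 0 (by simp)
          simpa using this
        have h1 : pvIdxI ((0 : Int) :: ((0 : Int) :: pvAccum 0 ((pvRuns (t.map (fun q => q.2))).map (fun r => r.2))).map
            (fun v => ((tw.length + 1 : Nat) : Int) + v)) (0 + 1) = ((tw.length + 1 : Nat) : Int) := by
          have := pv_idxI_natCast ((0 : Int) :: ((0 : Int) :: pvAccum 0 ((pvRuns (t.map (fun q => q.2))).map (fun r => r.2))).map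
            (fun v => ((tw.length + 1 : Nat) : Int) + v)) 1 (by simp)
          simpa using this
        rw [h0, h1]
        have e : (((tw.length + 1 : Nat) : Int)) - 1 = (tw.length : Int) := by push_cast; ring
        rw [e]
        have hS0 : pvIdxS ((p.1 :: tw.map (fun q => q.1)) ++ t.map (fun q => q.1)) 0 = p.1 := by
          have := pv_idxS_natCast ((p.1 :: tw.map (fun q => q.1)) ++ t.map (fun q => q.1)) 0 (by simp)
          simpa using this
        have hSlast : pvIdxS ((p.1 :: tw.map (fun q => q.1)) ++ t.map (fun q => q.1)) (tw.length : Int)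
            = (p.1 :: tw.map (fun q => q.1)).getLast (by simp) := by
          rw [pv_idxS_natCast _ tw.length (by simp)]
          rw [List.getElem_append_left (by simp)]
          rw [List.getLast_eq_getElem]
          simp
        rw [hS0, hSlast]
      · -- the remaining segments
        rw [← IH]
        unfold pvTailP
        apply List.ext_getElem?
        intro m
        simp only [List.getElem?_map, PySem.List.getElem?_enumerate]
        cases hm : (pvRuns (t.map (fun q => q.2)))[m]? with
        | none => simp
        | some j =>
          obtain ⟨hmlt, -⟩ := List.getElem?_eq_some_iff.mp hm
          simp only [Option.map_some, Option.some_inj]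
          simp only [zero_add]
          rw [C1 m (by omega), C4 _ (Cnn m (by omega))]
          have e3 : (1 + (m : Int)) + 1 = 1 + ((m + 1 : Nat) : Int) := by push_cast; ring
          rw [e3, C1 (m + 1) (by omega)]
          have e4 : ∀ a b : Int, a + b - 1 = a + (b - 1) := by intros; ring
          rw [e4, C4 _ (by have := Cpos m hmlt; push_cast at this ⊢; omega)]
          push_cast
          ring_nf

theorem pv_tailP_eq_segs (ps : List (String × String))
    (h : ∀ q ∈ ps, PySem.Str.len q.2 = 1) :
    pvTailP ps = pvSegs ps :=
  pv_tailP_eq_segs_fuel ps.length ps le_rfl h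

-- proof-side: the head character of a pair's (single-character) label
def pvHc (q : String × String) : Char := q.2.toList.headD ' '

theorem pv_join_toList (xs : List String) :
    (PySem.Str.join "" xs).toList = xs.flatMap (fun s => s.toList) := by
  have h : ∀ (xss : List (List Char)), [].intercalate xss = xss.flatten := by
    intro xss
    induction xss with
    | nil => rfl
    | cons a t ih =>
      cases t with
      | nil => simp [List.intercalate]
      | cons b t2 =>
        simp [List.intercalate, List.intersperse] at ih ⊢
        simpa using ih
  simp [pysem, PySem.Chars.join, h, List.flatMap_def]

theorem pv_single_toList {q : String × String} (h : PySem.Str.len q.2 = 1) :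
    ∃ c, q.2.toList = [c] := by
  rw [PySem.Str.len_eq] at h
  have : q.2.toList.length = 1 := by exact_mod_cast h
  obtain ⟨c, hc⟩ := List.length_eq_one_iff.mp this
  exact ⟨c, hc⟩

theorem pv_takeWhile_congr {α : Type} (p q : α → Bool) :
    ∀ (l : List α), (∀ x ∈ l, p x = q x) → l.takeWhile p = l.takeWhile q := by
  intro l
  induction l with
  | nil => intro _; rfl
  | cons x xs ih =>
    intro hpq
    simp only [List.takeWhile_cons, hpq x (by simp)]
    cases hx : q x
    · rfl
    · rw [ih (fun y hy => hpq y (by simp [hy]))]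

theorem pv_chars (ps : List (String × String)) (h : ∀ q ∈ ps, PySem.Str.len q.2 = 1) :
    ps.flatMap (fun q => q.2.toList) = ps.map pvHc := by
  induction ps with
  | nil => rfl
  | cons q rest ih =>
    obtain ⟨c, hc⟩ := pv_single_toList (h q (by simp))
    simp only [List.flatMap_cons, List.map_cons, hc, pvHc]
    rw [ih (fun x hx => h x (by simp [hx]))]
    simp [hc]

theorem pv_scan_segs_fuel (N : Nat) : ∀ (done rem : List (String × String)),
    rem.length ≤ N → (∀ q ∈ rem, PySem.Str.len q.2 = 1) →
    pvScan (done ++ rem) (rem.map pvHc) done.length = (pvSegs rem).map pvFmt := by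
  induction N with
  | zero =>
    intro done rem hlen _
    have : rem = [] := List.eq_nil_of_length_eq_zero (by omega)
    subst this
    simp [pvScan, pvSegs]
  | succ N ihN =>
    intro done rem hlen h
    cases rem with
    | nil => simp [pvScan, pvSegs]
    | cons q rest =>
      obtain ⟨c, hc⟩ := pv_single_toList (h q (by simp))
      have hrest : rest.takeWhile (fun r => r.2 == q.2) ++ rest.dropWhile (fun r => r.2 == q.2) = rest :=
        List.takeWhile_append_dropWhile
      set tw := rest.takeWhile (fun r => r.2 == q.2) with htw
      set t := rest.dropWhile (fun r => r.2 == q.2) with ht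
      have htwmem : ∀ r ∈ tw, r.2 = q.2 := fun r hr => by
        have := List.mem_takeWhile_imp hr; simpa using this
      have hthead : ∀ r, t.head? = some r → r.2 ≠ q.2 := fun r hr => by
        have := pv_head_dropWhile _ rest r hr; simpa using this
      have htmem : ∀ r ∈ t, r ∈ rest := fun r hr => by
        rw [← hrest]; exact List.mem_append_right _ hr
      have htwmem' : ∀ r ∈ tw, r ∈ rest := fun r hr => by
        rw [← hrest]; exact List.mem_append_left _ hr
      -- the inner while counts exactly the first run of equal labels
      have hcw : (rest.map pvHc).takeWhile (fun d => d == pvHc q) = tw.map pvHc := by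
        rw [List.takeWhile_map, htw]
        congr 1
        refine pv_takeWhile_congr _ _ rest (fun r hr => ?_)
        obtain ⟨d, hd⟩ := pv_single_toList (h r (by simp [hr]))
        have hiff : (r.2 = q.2) ↔ (d = c) := by
          constructor
          · intro he; rw [he] at hd; rw [hd] at hc; exact (List.cons_eq_cons.mp hc).1
          · intro he; apply String.toList_inj.mp; rw [hd, hc, he]
        simp [Function.comp, pvHc, hd, hc, hiff]
      have hshift : ∀ (w : Nat), pvIdxS ((done ++ q :: rest).map (fun r => r.1)) ((done.length + w : Nat) : Int)
          = pvIdxS ((q :: rest).map (fun r => r.1)) (w : Int) := by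
        intro w
        simp only [List.map_append, pvIdxS, PySem.List.pyGet?_natCast]
        rw [List.getElem?_append_right (by simp)]
        simp
      have hone : String.ofList [c] = q.2 := by
        rw [← hc, String.ofList_toList]
      have hfst : pvIdxS ((done ++ q :: rest).map (fun r => r.1)) (done.length : Int) = q.1 := by
        have h0 := hshift 0
        simp only [Nat.add_zero] at h0
        rw [h0]
        have h1 := pv_idxS_natCast ((q :: rest).map (fun r => r.1)) 0 (by simp)
        simpa using h1
      have hlast : pvIdxS ((done ++ q :: rest).map (fun r => r.1)) ((done.length + tw.length : Nat) : Int)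
          = (q.1 :: tw.map (fun r => r.1)).getLast (by simp) := by
        rw [hshift tw.length, ← hrest]
        have hb : tw.length < ((q :: (tw ++ t)).map (fun r => r.1)).length := by simp
        rw [pv_idxS_natCast _ tw.length hb]
        have : (q :: (tw ++ t)).map (fun r => r.1) = (q.1 :: tw.map (fun r => r.1)) ++ t.map (fun r => r.1) := by simp
        rw [List.getElem_of_eq this, List.getElem_append_left (by simp)]
        rw [List.getLast_eq_getElem]
        simp
      have hdrop : (rest.map pvHc).drop tw.length = t.map pvHc := by
        conv_lhs => rw [← hrest]
        rw [List.map_append, List.drop_left' (by simp)]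
      have hpos : done.length + tw.length + 1 = (done ++ q :: tw).length := by
        simp [List.length_append, List.length_cons]
        omega
      -- one step of the scan
      simp only [List.map_cons]
      rw [pvScan, hcw]
      simp only [List.length_map]
      have hhc : pvHc q = c := by simp [pvHc, hc]
      rw [hhc, hone, hfst, hlast, hdrop]
      rw [show pvSegs (q :: rest) = pvSegsAux q.2 q.1 q.1 rest from rfl, ← hrest,
        pv_segsAux_run q.2 q.1 q.1 tw t htwmem hthead]
      simp only [List.map_cons]
      congr 1
      rw [show done ++ q :: (tw ++ t) = (done ++ q :: tw) ++ t by simp, hpos]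
      have hlent : t.length ≤ N := by
        have hd := List.length_dropWhile_le (fun r => r.2 == q.2) rest
        rw [← ht] at hd
        simp only [List.length_cons] at hlen
        omega
      exact ihN (done ++ q :: tw) t hlent (fun r hr => h r (by simp [htmem r hr]))

theorem pv_alt_eq_segs (l : List (String × String × String))
    (h1 : ∀ x ∈ l, PySem.Str.len x.2.2 = 1) :
    get_ss_alt l = "type,start,end\n" :: (pvSegs (pvSm l)).map pvFmt := by
  have hrows : (PySem.List.enumerate l).foldl (fun acc ix => acc ++ [(ix.2.1, pvLabB l ix.1 ix.2)]) []
      = pvSm l := by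
    rw [PySem.List.foldl_append_singleton_eq_map]
    simp [pvSm]
  simp only [get_ss_alt, hrows]
  congr 1
  rw [pv_join_toList]
  have hsm := pv_sm_len_one l h1
  have hfm : ((pvSm l).map (fun r => r.2)).flatMap (fun s => s.toList) = (pvSm l).map pvHc := by
    rw [List.flatMap_map]
    exact pv_chars _ hsm
  rw [hfm]
  have hmain := pv_scan_segs_fuel (pvSm l).length [] (pvSm l) le_rfl hsm
  simpa using hmain

-- ===== VERDICT (by name: the statement is the Claim_ definition above) =====
theorem get_ss_spec : Claim_equal_get_ss := by
  intro l _ hpre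
  unfold Spec_get_ss
  obtain ⟨h1, -⟩ := hpre
  rw [get_ss, pv_anew_eq_sm l h1, pv_tail_pure, pv_tailP_eq_segs _ (pv_sm_len_one l h1),
    pv_alt_eq_segs l h1]
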